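-- pv_equiv track=rewrite | github.com/VRC-Staples/Elastic-Clothing-Fit | tests/test_run_all_timeout.py | _parse_suite_output
-- ===== SOURCE A (Python) =====
-- def _parse_suite_output(stdout):
--     """Parse [PASS] / [FAIL] / [SKIP] lines from a suite's stdout.
--
--     Returns (passed, failed, skipped, failures) where:
--       passed   — count of [PASS] lines
--       failed   — count of [FAIL] lines
--       skipped  — True if any [SKIP] line was present
--       failures — list of verbatim [FAIL] lines
--     """
--     passed = 0
--     failed = 0
--     skipped = False
--     failures = []
--     for line in stdout.splitlines():
--         s = line.strip()
--         if "[PASS]" in s: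
--             passed += 1
--         elif "[FAIL]" in s:
--             failed += 1
--             failures.append(s)
--         elif "[SKIP]" in s:
--             skipped = True
--     return passed, failed, skipped, failures
-- ===== SOURCE B (Python) =====
-- def _parse_suite_output(stdout):
--     """Parse [PASS] / [FAIL] / [SKIP] lines from a suite's stdout."""
--     lines = [l.strip() for l in stdout.splitlines()]
--     passed = sum(1 for s in lines if "[PASS]" in s)
--     failures = [s for s in lines if "[FAIL]" in s and "[PASS]" not in s]
--     skipped = any("[SKIP]" in s and "[PASS]" not in s and "[FAIL]" not in s
--                   for s in lines)
--     return passed, len(failures), skipped, failures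
-- ===== Notes on version B (the rewrite author's own statement) =====
-- stated objective: alternative
-- what changed: Replaces the single stateful loop with four accumulators by per-result scans: strip all lines once, then compute the pass count, the failure list and the skip flag each with its own comprehension/any over the stripped lines.
import Mathlib
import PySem

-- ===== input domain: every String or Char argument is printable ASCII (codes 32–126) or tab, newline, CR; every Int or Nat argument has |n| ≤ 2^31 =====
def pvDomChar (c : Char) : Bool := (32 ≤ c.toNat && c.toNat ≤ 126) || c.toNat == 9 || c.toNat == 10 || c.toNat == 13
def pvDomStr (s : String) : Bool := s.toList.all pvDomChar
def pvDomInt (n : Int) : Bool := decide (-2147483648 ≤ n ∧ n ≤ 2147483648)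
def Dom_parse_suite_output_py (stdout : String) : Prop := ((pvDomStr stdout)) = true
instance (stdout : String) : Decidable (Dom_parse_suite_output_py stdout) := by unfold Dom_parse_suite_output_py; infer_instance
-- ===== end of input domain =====

-- B replaces A's single four-accumulator loop by independent per-result scans over
-- the stripped lines (alternative decomposition, same cost).

-- ===== PORT A =====
-- the loop body of A, one step per raw line
def pvStepA (st : Int × Int × Bool × List String) (line : String) : Int × Int × Bool × List String :=
  let s := PySem.Str.strip line
  if PySem.Str.isIn "[PASS]" s then (st.1 + 1, st.2.1, st.2.2.1, st.2.2.2)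
  else if PySem.Str.isIn "[FAIL]" s then (st.1, st.2.1 + 1, st.2.2.1, st.2.2.2 ++ [s])
  else if PySem.Str.isIn "[SKIP]" s then (st.1, st.2.1, true, st.2.2.2)
  else st

def parse_suite_output_py (stdout : String) : Int × Int × Bool × List String :=
  (PySem.Str.splitlines stdout).foldl pvStepA (0, 0, false, [])

-- ===== PORT B =====
def parse_suite_output_py_alt (stdout : String) : Int × Int × Bool × List String :=
  let lines := (PySem.Str.splitlines stdout).map PySem.Str.strip
  let passed : Int := (lines.countP (fun s => PySem.Str.isIn "[PASS]" s) : Int)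
  let failures := lines.filter (fun s => PySem.Str.isIn "[FAIL]" s && !PySem.Str.isIn "[PASS]" s)
  let skipped := lines.any (fun s => PySem.Str.isIn "[SKIP]" s && !PySem.Str.isIn "[PASS]" s && !PySem.Str.isIn "[FAIL]" s)
  (passed, (failures.length : Int), skipped, failures)

-- ===== PRECONDITION & SPEC =====
def Spec_parse_suite_output_py (stdout : String) (out : Int × Int × Bool × List String) : Prop := out = parse_suite_output_py_alt stdout
instance (stdout : String) (out : Int × Int × Bool × List String) : Decidable (Spec_parse_suite_output_py stdout out) := by unfold Spec_parse_suite_output_py; infer_instance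

-- ===== CLAIM (what is proved, stated in full; the proofs are below) =====
def Claim_equal_parse_suite_output_py : Prop := ∀ (stdout : String), Dom_parse_suite_output_py stdout → Spec_parse_suite_output_py stdout (parse_suite_output_py stdout)

-- ===== LEMMAS AND PROOFS =====

-- invariant of A's loop: the fold over any line list with any start state adds
-- exactly B's per-result scans of the stripped lines
theorem pvFoldA_eq (l : List String) :
    ∀ (p f : Int) (sk : Bool) (fl : List String),
    l.foldl pvStepA (p, f, sk, fl) =
      (p + ((l.map PySem.Str.strip).countP (fun s => PySem.Str.isIn "[PASS]" s) : Int),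
       f + (((l.map PySem.Str.strip).filter (fun s => PySem.Str.isIn "[FAIL]" s && !PySem.Str.isIn "[PASS]" s)).length : Int),
       sk || (l.map PySem.Str.strip).any (fun s => PySem.Str.isIn "[SKIP]" s && !PySem.Str.isIn "[PASS]" s && !PySem.Str.isIn "[FAIL]" s),
       fl ++ (l.map PySem.Str.strip).filter (fun s => PySem.Str.isIn "[FAIL]" s && !PySem.Str.isIn "[PASS]" s)) := by
  induction l with
  | nil => simp
  | cons a t ih =>
    intro p f sk fl
    simp only [List.foldl_cons, List.map_cons, List.countP_cons, List.filter_cons, List.any_cons]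
    by_cases hp : PySem.Chars.isIn ['[', 'P', 'A', 'S', 'S', ']'] (PySem.Chars.strip a.toList) = true
    · simp [pvStepA, hp, ih]; ring
    · by_cases hf : PySem.Chars.isIn ['[', 'F', 'A', 'I', 'L', ']'] (PySem.Chars.strip a.toList) = true
      · simp [pvStepA, hp, hf, ih]; ring
      · by_cases hs : PySem.Chars.isIn ['[', 'S', 'K', 'I', 'P', ']'] (PySem.Chars.strip a.toList) = true
        · simp [pvStepA, hp, hf, hs, ih]
        · simp [pvStepA, hp, hf, hs, ih]

-- ===== VERDICT (by name: the statement is the Claim_ definition above) =====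
theorem parse_suite_output_py_spec : Claim_equal_parse_suite_output_py := by
  intro stdout _
  unfold Spec_parse_suite_output_py parse_suite_output_py parse_suite_output_py_alt
  rw [pvFoldA_eq]
  simp
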